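-- pv_equiv track=rewrite | github.com/ljm565/text-clip | src/utils/utils_prepare_chatbot.py | type1_merge_multiturn
-- ===== SOURCE A (Python) =====
-- def type1_merge_multiturn(sen_ids, sentences):
--     cur_sen_id = -100
--     multiturn, multiturns = [], []
--
--     for sen_id, sentence in zip(sen_ids, sentences):
--
--         if sen_id < cur_sen_id and cur_sen_id != -100:
--             multiturns.append(tuple(multiturn))
--             multiturn = []
--             cur_sen_id = sen_id
--             continue
--
--         multiturn.append(sentence)
--         cur_sen_id = sen_id
--
--     # append the last multi-turn data
--     multiturns.append(tuple(multiturn))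
--
--     return multiturns
-- ===== SOURCE B (Python) =====
-- def type1_merge_multiturn(sen_ids, sentences):
--     pairs = list(zip(sen_ids, sentences))
--     # a new dialogue starts at i+1 when the sentence id drops (id -100 never closes a group)
--     breaks = [i + 1 for i, ((prev_id, _), (cur_id, _)) in enumerate(zip(pairs, pairs[1:]))
--               if cur_id < prev_id and prev_id != -100]
--     multiturns = []
--     start = 0
--     for b in breaks:
--         multiturns.append(tuple(s for _, s in pairs[start:b]))
--         start = b + 1  # the boundary sentence itself is dropped
--     multiturns.append(tuple(s for _, s in pairs[start:]))
--     return multiturns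
-- ===== Notes on version B (the rewrite author's own statement) =====
-- stated objective: alternative
-- what changed: Replaces A's single stateful accumulating scan (current-id state, open segment, result list) with a two-phase index-table decomposition: first compute the list of break indices where the sentence id drops (and the previous id is not the -100 sentinel), then slice the zipped pairs at those indices.
import Mathlib
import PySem

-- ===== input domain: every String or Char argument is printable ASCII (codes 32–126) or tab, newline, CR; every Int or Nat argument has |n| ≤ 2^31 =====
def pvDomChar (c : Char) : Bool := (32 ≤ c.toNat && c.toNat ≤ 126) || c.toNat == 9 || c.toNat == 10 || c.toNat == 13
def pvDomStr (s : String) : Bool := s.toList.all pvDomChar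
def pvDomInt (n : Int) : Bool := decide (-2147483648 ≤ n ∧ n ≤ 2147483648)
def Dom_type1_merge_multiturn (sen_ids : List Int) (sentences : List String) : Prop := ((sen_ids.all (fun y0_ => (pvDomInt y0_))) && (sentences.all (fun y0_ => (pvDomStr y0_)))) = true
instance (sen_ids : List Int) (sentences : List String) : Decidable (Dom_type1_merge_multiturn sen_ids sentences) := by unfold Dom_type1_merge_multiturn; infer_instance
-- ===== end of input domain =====

-- B replaces A's single stateful accumulating scan by a two-phase decomposition (compute the
-- break-index table first, then slice the zipped pairs at those indices); objective: alternative.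

-- ===== PORT A =====
def type1_merge_multiturn (sen_ids : List Int) (sentences : List String) : List (List String) :=
  -- state: (cur_sen_id, multiturn, multiturns)
  let fin := (sen_ids.zip sentences).foldl
    (fun (st : Int × List String × List (List String)) (p : Int × String) =>
      if p.1 < st.1 ∧ st.1 ≠ -100 then (p.1, ([] : List String), st.2.2 ++ [st.2.1])
      else (p.1, st.2.1 ++ [p.2], st.2.2))
    (-100, [], [])
  fin.2.2 ++ [fin.2.1]

-- ===== PORT B =====
def type1_merge_multiturn_alt (sen_ids : List Int) (sentences : List String) : List (List String) :=
  let pairs := sen_ids.zip sentences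
  -- zip(pairs, pairs[1:]) = pairs.zip pairs.tail (PySem.List.slice_from_one)
  let breaks : List Int := (PySem.List.enumerate (pairs.zip pairs.tail)).filterMap
    (fun ip => if ip.2.2.1 < ip.2.1.1 ∧ ip.2.1.1 ≠ -100 then some (ip.1 + 1) else none)
  let fin := breaks.foldl
    (fun (st : Int × List (List String)) (b : Int) =>
      (b + 1, st.2 ++ [(PySem.List.slice pairs (some st.1) (some b)).map Prod.snd]))
    (0, [])
  fin.2 ++ [(PySem.List.slice pairs (some fin.1) none).map Prod.snd]

-- ===== PRECONDITION & SPEC =====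
def Spec_type1_merge_multiturn (sen_ids : List Int) (sentences : List String) (out : List (List String)) : Prop := out = type1_merge_multiturn_alt sen_ids sentences
instance (sen_ids : List Int) (sentences : List String) (out : List (List String)) : Decidable (Spec_type1_merge_multiturn sen_ids sentences out) := by unfold Spec_type1_merge_multiturn; infer_instance

-- ===== CLAIM (what is proved, stated in full; the proofs are below) =====
def Claim_equal_type1_merge_multiturn : Prop := ∀ (sen_ids : List Int) (sentences : List String), Dom_type1_merge_multiturn sen_ids sentences → Spec_type1_merge_multiturn sen_ids sentences (type1_merge_multiturn sen_ids sentences)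

-- ===== LEMMAS AND PROOFS =====

/-- Reference recursion: group the remaining pairs; `prev` = id of the previous sentence,
`acc` = sentences of the currently open group. -/
def pvGo1 : List (Int × String) → Int → List String → List (List String)
  | [], _, acc => [acc]
  | (i, s) :: r, prev, acc =>
      if i < prev ∧ prev ≠ -100 then acc :: pvGo1 r i [] else pvGo1 r i (acc ++ [s])

theorem pvFoldA (ps : List (Int × String)) : ∀ (prev : Int) (acc : List String)
    (mts : List (List String)),
    (ps.foldl
        (fun (st : Int × List String × List (List String)) (p : Int × String) =>
          if p.1 < st.1 ∧ st.1 ≠ -100 then (p.1, ([] : List String), st.2.2 ++ [st.2.1])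
          else (p.1, st.2.1 ++ [p.2], st.2.2)) (prev, acc, mts)).2.2
      ++ [(ps.foldl
        (fun (st : Int × List String × List (List String)) (p : Int × String) =>
          if p.1 < st.1 ∧ st.1 ≠ -100 then (p.1, ([] : List String), st.2.2 ++ [st.2.1])
          else (p.1, st.2.1 ++ [p.2], st.2.2)) (prev, acc, mts)).2.1]
      = mts ++ pvGo1 ps prev acc := by
  induction ps with
  | nil => intro prev acc mts; simp [pvGo1]
  | cons p r ih =>
    intro prev acc mts
    by_cases hc : p.1 < prev ∧ prev ≠ -100
    · simp only [List.foldl_cons, pvGo1]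
      rw [if_pos hc, if_pos hc, ih p.1 [] (mts ++ [acc])]
      simp
    · simp only [List.foldl_cons, pvGo1]
      rw [if_neg hc, if_neg hc]
      exact ih p.1 (acc ++ [p.2]) mts

theorem pvA_eq (sen_ids : List Int) (sentences : List String) :
    type1_merge_multiturn sen_ids sentences =
      match sen_ids.zip sentences with
      | [] => [[]]
      | p :: ps => pvGo1 ps p.1 [p.2] := by
  dsimp only [type1_merge_multiturn]
  cases hz : sen_ids.zip sentences with
  | nil => simp
  | cons p ps =>
    simp only [List.foldl_cons]
    have hcond : ¬ (p.1 < (-100 : Int) ∧ (-100 : Int) ≠ -100) := by simp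
    rw [if_neg hcond]
    have := pvFoldA ps p.1 ([] ++ [p.2]) []
    simpa using this

-- B-side machinery -----------------------------------------------------------

/-- Break positions within a zipped adjacent-pair list (0-based). -/
def pvBrkz : List ((Int × String) × (Int × String)) → List Nat
  | [] => []
  | pq :: r => (if pq.2.1 < pq.1.1 ∧ pq.1.1 ≠ -100 then [0] else []) ++ (pvBrkz r).map (· + 1)

/-- Nat break indices of a pair list (each ≥ 1). -/
def pvBrks (pairs : List (Int × String)) : List Nat :=
  (pvBrkz (pairs.zip pairs.tail)).map (· + 1)

/-- Cut `pairs` at the given break indices, the current segment starting at `start`. -/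
def pvCut (pairs : List (Int × String)) : Nat → List Nat → List (List String)
  | start, [] => [(pairs.drop start).map Prod.snd]
  | start, b :: bs => ((pairs.drop start).take (b - start)).map Prod.snd :: pvCut pairs (b + 1) bs

theorem pvEnumFilter (l : List ((Int × String) × (Int × String))) : ∀ (s : Int),
    (PySem.List.enumerate l s).filterMap
        (fun ip => if ip.2.2.1 < ip.2.1.1 ∧ ip.2.1.1 ≠ -100 then some (ip.1 + 1) else none)
      = (pvBrkz l).map (fun (n : Nat) => s + (n : Int) + 1) := by
  induction l with
  | nil => intro s; simp [PySem.List.enumerate_nil, pvBrkz]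
  | cons pq r ih =>
    intro s
    rw [PySem.List.enumerate_cons, List.filterMap_cons]
    by_cases hc : pq.2.1 < pq.1.1 ∧ pq.1.1 ≠ -100
    · simp only [pvBrkz, if_pos hc, List.singleton_append, List.map_cons, List.map_map,
        ih (s + 1)]
      refine congrArg₂ List.cons (by push_cast; ring) ?_
      apply List.map_congr_left; intro n _
      simp only [Function.comp_apply]; push_cast; ring
    · simp only [pvBrkz, if_neg hc, List.nil_append, List.map_map, ih (s + 1)]
      apply List.map_congr_left; intro n _
      simp only [Function.comp_apply]; push_cast; ring

theorem pvBreaks_eq (pairs : List (Int × String)) :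
    (PySem.List.enumerate (pairs.zip pairs.tail)).filterMap
        (fun ip => if ip.2.2.1 < ip.2.1.1 ∧ ip.2.1.1 ≠ -100 then some (ip.1 + 1) else none)
      = (pvBrks pairs).map (fun (n : Nat) => (n : Int)) := by
  rw [pvEnumFilter _ 0]
  unfold pvBrks
  rw [List.map_map]
  apply List.map_congr_left; intro n _
  simp only [Function.comp_apply]; push_cast; ring

theorem pvFoldB (pairs : List (Int × String)) (bs : List Nat) : ∀ (s : Nat)
    (segs : List (List String)),
    ((bs.map (fun (n : Nat) => (n : Int))).foldl
        (fun (st : Int × List (List String)) (b : Int) =>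
          (b + 1, st.2 ++ [(PySem.List.slice pairs (some st.1) (some b)).map Prod.snd]))
        (((s : Nat) : Int), segs)).2
      ++ [(PySem.List.slice pairs
          (some ((bs.map (fun (n : Nat) => (n : Int))).foldl
            (fun (st : Int × List (List String)) (b : Int) =>
              (b + 1, st.2 ++ [(PySem.List.slice pairs (some st.1) (some b)).map Prod.snd]))
            (((s : Nat) : Int), segs)).1) none).map Prod.snd]
      = segs ++ pvCut pairs s bs := by
  induction bs with
  | nil => intro s segs; simp [pvCut, PySem.List.slice_from_natCast]
  | cons b r ih =>
    intro s segs
    simp only [List.map_cons, List.foldl_cons, PySem.List.slice_natCast]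
    have hcast : ((b : Int) + 1) = (((b + 1 : Nat) : Nat) : Int) := by push_cast; ring
    rw [hcast, ih (b + 1) (segs ++ [((pairs.drop s).take (b - s)).map Prod.snd])]
    simp [pvCut]

theorem pvBrks_cons_cons (p q : Int × String) (r : List (Int × String)) :
    pvBrks (p :: q :: r)
      = (if q.1 < p.1 ∧ p.1 ≠ -100 then [1] else []) ++ (pvBrks (q :: r)).map (· + 1) := by
  unfold pvBrks
  simp only [List.zip_cons_cons, List.tail_cons, pvBrkz]
  by_cases hc : q.1 < p.1 ∧ p.1 ≠ -100 <;> simp [hc, List.map_map, Function.comp]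

def pvMapHead (f : List String → List String) : List (List String) → List (List String)
  | [] => []
  | h :: t => f h :: t

theorem pvMapHead_id (l : List (List String)) :
    pvMapHead (fun h => ([] : List String) ++ h) l = l := by
  cases l <;> simp [pvMapHead]

theorem pvMapHead_mapHead (f g : List String → List String) (l : List (List String)) :
    pvMapHead f (pvMapHead g l) = pvMapHead (fun x => f (g x)) l := by
  cases l <;> simp [pvMapHead]

theorem pvShift1 (bs : List Nat) : ∀ (x : Int × String) (xs : List (Int × String)) (s : Nat),
    pvCut (x :: xs) (s + 1) (bs.map (· + 1)) = pvCut xs s bs := by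
  induction bs with
  | nil => intro x xs s; simp [pvCut]
  | cons b r ih =>
    intro x xs s
    simp only [List.map_cons, pvCut, List.drop_succ_cons]
    rw [show b + 1 - (s + 1) = b - s by omega, show b + 1 + 1 = (b + 1) + 1 from rfl, ih]

theorem pvShift0 (bs : List Nat) (x : Int × String) (xs : List (Int × String)) :
    pvCut (x :: xs) 0 (bs.map (· + 1)) = pvMapHead (x.2 :: ·) (pvCut xs 0 bs) := by
  cases bs with
  | nil => simp [pvCut, pvMapHead]
  | cons b r =>
    simp only [List.map_cons, pvCut, pvMapHead, List.drop_zero]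
    rw [show b + 1 - 0 = b + 1 from rfl, show b + 1 + 1 = (b + 1) + 1 from rfl, pvShift1]
    simp [pvCut]

theorem pvG (ps : List (Int × String)) : ∀ (p : Int × String) (acc : List String) (s : Nat),
    s ≤ 1 →
    pvMapHead (acc ++ ·) (pvCut (p :: ps) s (pvBrks (p :: ps)))
      = pvGo1 ps p.1 (acc ++ if s = 0 then [p.2] else []) := by
  induction ps with
  | nil =>
    intro p acc s hs
    interval_cases s <;> simp [pvBrks, pvBrkz, pvCut, pvMapHead, pvGo1]
  | cons q r ih =>
    intro p acc s hs
    rw [pvBrks_cons_cons]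
    have h1 : pvCut (q :: r) 1 (pvBrks (q :: r)) = pvGo1 r q.1 [] := by
      have := ih q [] 1 (by omega)
      rw [pvMapHead_id] at this
      simpa using this
    by_cases hc : q.1 < p.1 ∧ p.1 ≠ -100
    · simp only [if_pos hc, List.singleton_append, pvCut]
      rw [show (1 : Nat) + 1 = 1 + 1 from rfl, pvShift1, h1]
      interval_cases s <;> simp only [pvGo1, if_pos hc] <;> simp [pvMapHead]
    · simp only [if_neg hc, List.nil_append]
      interval_cases s
      · rw [pvShift0, pvMapHead_mapHead]
        have hfe : (fun x => acc ++ (p.2 :: x)) = (fun x => (acc ++ [p.2]) ++ x) := by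
          funext x; simp
        rw [hfe]
        have := ih q (acc ++ [p.2]) 0 (by omega)
        simp only [if_pos rfl] at this
        rw [this]
        simp [pvGo1, hc]
      · rw [show (1 : Nat) = 0 + 1 from rfl, pvShift1]
        have := ih q acc 0 (by omega)
        simp only [if_pos rfl] at this
        rw [this]
        simp [pvGo1, hc]

theorem pvB_eq (sen_ids : List Int) (sentences : List String) :
    type1_merge_multiturn_alt sen_ids sentences =
      match sen_ids.zip sentences with
      | [] => [[]]
      | p :: ps => pvGo1 ps p.1 [p.2] := by
  dsimp only [type1_merge_multiturn_alt]
  rw [pvBreaks_eq]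
  have h := pvFoldB (sen_ids.zip sentences) (pvBrks (sen_ids.zip sentences)) 0 []
  rw [Nat.cast_zero] at h
  rw [h]
  cases hz : sen_ids.zip sentences with
  | nil => simp [pvBrks, pvBrkz, pvCut]
  | cons p ps =>
    have := pvG ps p [] 0 (by omega)
    rw [pvMapHead_id] at this
    simpa using this

-- ===== VERDICT (by name: the statement is the Claim_ definition above) =====
theorem type1_merge_multiturn_spec : Claim_equal_type1_merge_multiturn := by
  intro sen_ids sentences _
  unfold Spec_type1_merge_multiturn
  rw [pvA_eq, pvB_eq]
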